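-- pv_equiv track=rewrite | github.com/akulacsathish-eng/test3 | part2_support.py | generate_part1_vault
-- ===== SOURCE A (Python) =====
-- from typing import Dict, List, Sequence, Tuple
--
-- def lcg_next(state: int) -> int:
--     return (state * 1664525 + 1013904223) & 0x7FFFFFFF
--
-- def generate_part1_vault(seed: int) -> List[List[str]]:
--     state = seed
--     vault = [["?" for _ in range(12)] for _ in range(8)]
--     for row in range(8):
--         for col in range(12):
--             state = lcg_next(state)
--             vault[row][col] = chr(ord("A") + (state % 26))
--     return vault
-- ===== SOURCE B (Python) =====
-- from typing import List
--
-- def lcg_next(state: int) -> int: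
--     return (state * 1664525 + 1013904223) & 0x7FFFFFFF
--
-- def generate_part1_vault(seed: int) -> List[List[str]]:
--     # Phase 1: generate the LCG letters as one flat row-major list.
--     flat = []
--     state = seed
--     for _ in range(96):
--         state = lcg_next(state)
--         flat.append(chr(ord("A") + state % 26))
--     # Phase 2: reshape the flat list into the 8x12 grid.
--     return [flat[r * 12:(r + 1) * 12] for r in range(8)]
-- ===== Notes on version B (the rewrite author's own statement) =====
-- stated objective: alternative
-- what changed: B generates the whole LCG letter sequence in one flat linear pass and then reshapes it into the 8x12 grid by slicing, instead of A's nested row/column loops filling a preallocated '?'-grid in place.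
import Mathlib
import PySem

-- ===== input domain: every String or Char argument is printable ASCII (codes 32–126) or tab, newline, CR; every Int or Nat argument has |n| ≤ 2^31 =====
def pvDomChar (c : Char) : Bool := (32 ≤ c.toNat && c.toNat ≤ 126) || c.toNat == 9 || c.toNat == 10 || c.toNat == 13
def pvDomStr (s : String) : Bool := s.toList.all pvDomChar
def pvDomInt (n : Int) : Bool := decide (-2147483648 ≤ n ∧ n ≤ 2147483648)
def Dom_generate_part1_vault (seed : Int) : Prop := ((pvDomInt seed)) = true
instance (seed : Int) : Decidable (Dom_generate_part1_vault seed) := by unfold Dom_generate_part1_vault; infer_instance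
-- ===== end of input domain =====

-- B separates flat LCG-letter generation (one linear pass) from the 8x12 reshape
-- (slicing), instead of A's nested row/column loops filling a preallocated "?"-grid in place;
-- alternative decomposition of the same cost, return-value equivalence.
-- ===== PORT A =====
def lcg_next (state : Int) : Int := PySem.Int.band (state * 1664525 + 1013904223) 0x7FFFFFFF

-- chr(ord("A") + state % 26) applied to the freshly advanced LCG state (identical expression in both Pythons)
def pvLetter (state : Int) : String :=
  String.ofList [Char.ofNat (65 + PySem.Int.mod state 26).toNat]

def generate_part1_vault (seed : Int) : List (List String) :=
  -- state = seed; vault = [["?" for _ in range(12)] for _ in range(8)]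
  -- for row in range(8): for col in range(12): state = lcg_next(state); vault[row][col] = chr(ord("A") + state % 26)
  ((List.range 8).foldl (fun (acc : Int × List (List String)) (row : Nat) =>
      (List.range 12).foldl (fun (acc : Int × List (List String)) (col : Nat) =>
        (lcg_next acc.1, acc.2.set row ((acc.2.getD row []).set col (pvLetter (lcg_next acc.1))))) acc)
    (seed, (List.range 8).map (fun _ => (List.range 12).map (fun _ => "?")))).2

-- ===== PORT B =====
-- flat = []; state = seed; for _ in range(96): state = lcg_next(state); flat.append(chr(ord("A") + state % 26))
def pvFlat (seed : Int) : List String :=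
  ((List.range 96).foldl (fun (acc : Int × List String) (_ : Nat) =>
    (lcg_next acc.1, acc.2 ++ [pvLetter (lcg_next acc.1)])) (seed, ([] : List String))).2

def generate_part1_vault_alt (seed : Int) : List (List String) :=
  -- return [flat[r*12:(r+1)*12] for r in range(8)]
  (List.range 8).map (fun (r : Nat) =>
    PySem.List.slice (pvFlat seed) (some ((r : Int) * 12)) (some (((r : Int) + 1) * 12)))

-- ===== PRECONDITION & SPEC =====
def Spec_generate_part1_vault (seed : Int) (out : List (List String)) : Prop := out = generate_part1_vault_alt seed
instance (seed : Int) (out : List (List String)) : Decidable (Spec_generate_part1_vault seed out) := by unfold Spec_generate_part1_vault; infer_instance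

-- ===== CLAIM (what is proved, stated in full; the proofs are below) =====
def Claim_equal_generate_part1_vault : Prop := ∀ (seed : Int), Dom_generate_part1_vault seed → Spec_generate_part1_vault seed (generate_part1_vault seed)

-- ===== LEMMAS AND PROOFS =====

-- the LCG state after n steps
def pvState (s : Int) (n : Nat) : Int := lcg_next^[n] s

-- (final state, letters emitted) after n LCG steps from s
def pvGen (s : Int) : Nat → Int × List String
  | 0 => (s, [])
  | n + 1 =>
    let p := pvGen (lcg_next s) n
    (p.1, pvLetter (lcg_next s) :: p.2)

-- the intended r-th row
def pvRow (s : Int) (r : Nat) : List String :=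
  (List.range 12).map (fun c => pvLetter (pvState s (r * 12 + c + 1)))

lemma pvGen_eq (n : Nat) : ∀ s : Int,
    pvGen s n = (pvState s n, (List.range n).map (fun k => pvLetter (pvState s (k + 1)))) := by
  induction n with
  | zero => intro s; simp [pvGen, pvState]
  | succ n ih =>
    intro s
    have h1 : ∀ k, pvState (lcg_next s) k = pvState s (k + 1) := by
      intro k
      simp [pvState, Function.iterate_add_apply lcg_next k 1 s]
    simp only [pvGen, ih, List.range_succ_eq_map, List.map_cons, List.map_map]
    refine Prod.ext (by simpa using h1 n) ?_
    simp only [h1]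
    rfl

-- B's flat accumulation loop
lemma foldl_flat (l : List Nat) : ∀ (s : Int) (acc : List String),
    l.foldl (fun (acc : Int × List String) (_ : Nat) =>
      (lcg_next acc.1, acc.2 ++ [pvLetter (lcg_next acc.1)])) (s, acc)
    = ((pvGen s l.length).1, acc ++ (pvGen s l.length).2) := by
  induction l with
  | nil => intro s acc; simp [pvGen]
  | cons a l ih =>
    intro s acc
    simp only [List.foldl_cons, List.length_cons, pvGen, ih]
    simp

lemma set_take_succ {α : Type} (l : List α) (j : Nat) (a : α) (h : j < l.length) :
    (l.set j a).take (j + 1) = l.take j ++ [a] := by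
  induction l generalizing j with
  | nil => simp at h
  | cons x xs ih =>
    cases j with
    | zero => simp
    | succ j =>
      simp only [List.set_cons_succ, List.take_succ_cons, List.cons_append]
      rw [ih j (by simpa using h)]

lemma drop_set_of_lt {α : Type} (l : List α) (j n : Nat) (a : α) (h : j < n) :
    (l.set j a).drop n = l.drop n := by
  apply List.ext_getElem?
  intro i
  rw [List.getElem?_drop, List.getElem?_drop, List.getElem?_set_ne (by omega)]

-- A's inner (column) loop at row r, over column indices range' j n
lemma inner_loop (r : Nat) (n : Nat) : ∀ (j : Nat) (s : Int) (v : List (List String)),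
    (v.getD r []).length = j + n →
    (List.range' j n).foldl (fun (acc : Int × List (List String)) (col : Nat) =>
      (lcg_next acc.1, acc.2.set r ((acc.2.getD r []).set col (pvLetter (lcg_next acc.1))))) (s, v)
    = ((pvGen s n).1, v.set r ((v.getD r []).take j ++ (pvGen s n).2)) := by
  induction n with
  | zero =>
    intro j s v h
    simp only [List.range', List.foldl_nil, pvGen, List.append_nil]
    rw [List.take_of_length_le (by omega)]
    by_cases hr : r < v.length
    · rw [List.getD_eq_getElem v [] hr, List.set_getElem_self]
    · rw [List.set_eq_of_length_le (by omega)]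
  | succ n ih =>
    intro j s v h
    have hr : r < v.length := by
      by_contra hr
      rw [List.getD_eq_default v [] (by omega)] at h
      simp at h
    have hj : j < (v.getD r []).length := by omega
    have hget : (v.set r ((v.getD r []).set j (pvLetter (lcg_next s)))).getD r []
        = (v.getD r []).set j (pvLetter (lcg_next s)) := by
      rw [List.getD_eq_getElem _ [] (by simpa using hr), List.getElem_set_self]
    simp only [List.range'_succ, List.foldl_cons]
    rw [ih (j + 1) (lcg_next s) (v.set r ((v.getD r []).set j (pvLetter (lcg_next s))))
      (by rw [hget, List.length_set]; omega)]
    simp only [pvGen, List.set_set, hget]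
    rw [set_take_succ _ _ _ hj]
    simp

-- A's inner loop over the actual range(12), given a 12-long row
lemma inner_loop12 (r : Nat) (s : Int) (v : List (List String))
    (h : (v.getD r []).length = 12) :
    (List.range 12).foldl (fun (acc : Int × List (List String)) (col : Nat) =>
      (lcg_next acc.1, acc.2.set r ((acc.2.getD r []).set col (pvLetter (lcg_next acc.1))))) (s, v)
    = ((pvGen s 12).1, v.set r (pvGen s 12).2) := by
  rw [List.range_eq_range', inner_loop r 12 0 s v (by simpa using h)]
  simp

-- A's outer (row) loop, over row indices range' j n
lemma outer_loop (n : Nat) : ∀ (j : Nat) (s : Int) (v : List (List String)),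
    j + n ≤ v.length →
    (∀ r, j ≤ r → r < j + n → (v.getD r []).length = 12) →
    (List.range' j n).foldl (fun (acc : Int × List (List String)) (row : Nat) =>
      (List.range 12).foldl (fun (acc : Int × List (List String)) (col : Nat) =>
        (lcg_next acc.1, acc.2.set row ((acc.2.getD row []).set col (pvLetter (lcg_next acc.1))))) acc) (s, v)
    = (pvState s (12 * n), v.take j ++ (List.range n).map (fun i => pvRow s i) ++ v.drop (j + n)) := by
  induction n with
  | zero =>
    intro j s v _ _
    simp [pvState, List.take_append_drop]
  | succ n ih =>
    intro j s v hlen hrows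
    have hj : j < v.length := by omega
    simp only [List.range'_succ, List.foldl_cons]
    rw [inner_loop12 j s v (hrows j le_rfl (by omega))]
    have hgen12 : ∀ t : Int, (pvGen t 12).1 = pvState t 12 := by
      intro t; rw [pvGen_eq]
    have hrow0 : (pvGen s 12).2 = pvRow s 0 := by
      rw [pvGen_eq]
      exact List.map_congr_left (fun c _ => by norm_num [pvRow])
    rw [ih (j + 1) (pvGen s 12).1 (v.set j (pvGen s 12).2)
      (by rw [List.length_set]; omega)
      (by intro r h1 h2
          have : (v.set j (pvGen s 12).2).getD r [] = v.getD r [] := by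
            simp only [List.getD, List.getElem?_set_ne (by omega : j ≠ r)]
          rw [this]
          exact hrows r (by omega) (by omega))]
    have hstate : pvState (pvGen s 12).1 (12 * n) = pvState s (12 * (n + 1)) := by
      rw [hgen12, pvState, pvState, pvState, ← Function.iterate_add_apply]
      congr 1
    have htake : (v.set j (pvGen s 12).2).take (j + 1) = v.take j ++ [pvRow s 0] := by
      rw [set_take_succ _ _ _ hj, hrow0]
    have hdrop : (v.set j (pvGen s 12).2).drop (j + 1 + n) = v.drop (j + 1 + n) :=
      drop_set_of_lt _ _ _ _ (by omega)
    have hmap : (List.range n).map (fun i => pvRow (pvGen s 12).1 i)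
        = (List.range n).map (fun i => pvRow s (i + 1)) := by
      apply List.map_congr_left
      intro i _
      apply List.map_congr_left
      intro c _
      congr 1
      rw [hgen12, pvState, pvState, pvState, ← Function.iterate_add_apply]
      congr 1; ring
    rw [hstate, htake, hdrop, hmap]
    have hrange : (List.range (n + 1)).map (fun i => pvRow s i)
        = pvRow s 0 :: (List.range n).map (fun i => pvRow s (i + 1)) := by
      rw [List.range_succ_eq_map, List.map_cons, List.map_map]
      rfl
    rw [hrange]
    simp only [List.append_assoc, List.cons_append, List.nil_append]
    rw [show j + 1 + n = j + (n + 1) from by omega]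

-- A computes the intended grid
lemma portA_eq (seed : Int) :
    generate_part1_vault seed = (List.range 8).map (fun r => pvRow seed r) := by
  unfold generate_part1_vault
  rw [show (List.range 8) = List.range' 0 8 from List.range_eq_range']
  rw [outer_loop 8 0 seed _ (by simp) (by
      intro r _ hr
      have hr8 : r < 8 := by omega
      rw [List.getD_eq_getElem _ [] (by simpa using hr)]
      interval_cases r <;> rfl)]
  simp [List.range_eq_range']

-- the r-th 12-chunk of a range
lemma take_drop_range (m r : Nat) :
    ((List.range (r * 12 + (12 + m))).drop (r * 12)).take 12 = List.range' (r * 12) 12 := by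
  have hsplit : List.range (r * 12 + (12 + m))
      = List.range' 0 (r * 12) ++ List.range' (r * 12) (12 + m) := by
    rw [List.range_eq_range']
    have := List.range'_append (s := 0) (m := r * 12) (n := 12 + m) (step := 1)
    simp at this; exact this.symm
  have hsplit2 : List.range' (r * 12) (12 + m)
      = List.range' (r * 12) 12 ++ List.range' (r * 12 + 12) m := by
    have := List.range'_append (s := r * 12) (m := 12) (n := m) (step := 1)
    simpa using this.symm
  rw [hsplit]
  set A := List.range' 0 (r * 12) with hA
  have h1 : r * 12 = A.length := by simp [hA]
  conv_lhs => rw [h1]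
  rw [List.drop_left, ← h1, hsplit2]
  set B := List.range' (r * 12) 12 with hB
  have h2 : (12 : Nat) = B.length := by simp [hB]
  conv_lhs => rw [h2]
  rw [List.take_left]

-- B computes the intended grid
lemma portB_eq (seed : Int) :
    generate_part1_vault_alt seed = (List.range 8).map (fun r => pvRow seed r) := by
  unfold generate_part1_vault_alt pvFlat
  rw [foldl_flat]
  simp only [List.length_range, List.nil_append]
  apply List.map_congr_left
  intro r hr
  have hr8 : r < 8 := List.mem_range.mp hr
  rw [show ((r : Int) * 12) = ((r * 12 : Nat) : Int) from by push_cast; ring,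
    show (((r : Int) + 1) * 12) = ((r * 12 + 12 : Nat) : Int) from by push_cast; ring,
    PySem.List.slice_natCast]
  rw [show r * 12 + 12 - r * 12 = 12 from by omega, pvGen_eq]
  rw [← List.map_drop, ← List.map_take]
  rw [show (96 : Nat) = r * 12 + (12 + (84 - r * 12)) from by omega, take_drop_range]
  rw [List.range'_eq_map_range, List.map_map]
  apply List.map_congr_left
  intro c _
  rfl

-- ===== VERDICT (by name: the statement is the Claim_ definition above) =====
theorem generate_part1_vault_spec : Claim_equal_generate_part1_vault := by
  intro seed _
  unfold Spec_generate_part1_vault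
  rw [portA_eq, portB_eq]
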